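-- pv_equiv track=rewrite | github.com/cat2151/cat-github-watcher | src/gh_pr_phase_monitor/phase/phase_detector.py | _phase_from_llm_statuses
-- ===== SOURCE A (Python) =====
-- from typing import Any, Dict, List, Optional, Union
--
-- PHASE_2 = "phase2"
--
-- PHASE_3 = "phase3"
--
-- def _phase_from_llm_statuses(llm_statuses: List[str]) -> Optional[str]:
--     """Infer phase from LLM statuses.
--
--     Returns PHASE_3 when reviewing → started work → finished work are detected in that order.
--     Returns PHASE_2 when reviewing occurred but post-review work (started→finished) is not yet complete.
--     Returns None when no reviewing event found (cannot determine phase2/3).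
--
--     Tracking is reset on each new reviewing event so only the most recent review cycle counts.
--     """
--     if not llm_statuses:
--         return None
--
--     last_review_idx: Optional[int] = None
--     last_started_after_review_idx: Optional[int] = None
--     last_finished_after_started_after_review_idx: Optional[int] = None
--
--     for idx, status in enumerate(llm_statuses):
--         lowered = status.lower()
--         if "reviewing" in lowered:
--             last_review_idx = idx
--             last_started_after_review_idx = None  # reset on new reviewing event
--             last_finished_after_started_after_review_idx = None
--         elif "started work" in lowered and last_review_idx is not None:
--             last_started_after_review_idx = idx
--             last_finished_after_started_after_review_idx = None  # reset finished when a new started begins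
--         elif "finished work" in lowered and last_started_after_review_idx is not None:
--             last_finished_after_started_after_review_idx = idx
--
--     if last_review_idx is None:
--         return None  # no reviewing event: cannot determine phase2/3
--
--     # reviewing → started work → finished work all in order → phase3
--     if last_finished_after_started_after_review_idx is not None:
--         return PHASE_3
--
--     # reviewing occurred but post-review work not yet complete → phase2
--     return PHASE_2
-- ===== SOURCE B (Python) =====
-- PHASE_2 = "phase2"
-- PHASE_3 = "phase3"
--
-- def _phase_from_llm_statuses(llm_statuses):
--     # Single backwards scan: the first "reviewing" seen from the right is the last
--     # review cycle; flags record whether a started (and a finished after it) lies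
--     # to its right.
--     seen_finished = False
--     seen_started = False
--     phase3_ready = False
--     for status in reversed(llm_statuses):
--         lowered = status.lower()
--         if "reviewing" in lowered:
--             return PHASE_3 if phase3_ready else PHASE_2
--         if "started work" in lowered:
--             if not seen_started:
--                 seen_started = True
--                 phase3_ready = seen_finished
--         elif "finished work" in lowered:
--             seen_finished = True
--     return None
-- ===== Notes on version B (the rewrite author's own statement) =====
-- stated objective: alternative
-- what changed: Replaces A's forward pass that maintains three last-seen index trackers with a single backwards scan over reversed(llm_statuses) that early-exits at the most recent reviewing event, keeping only three booleans.
import Mathlib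
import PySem

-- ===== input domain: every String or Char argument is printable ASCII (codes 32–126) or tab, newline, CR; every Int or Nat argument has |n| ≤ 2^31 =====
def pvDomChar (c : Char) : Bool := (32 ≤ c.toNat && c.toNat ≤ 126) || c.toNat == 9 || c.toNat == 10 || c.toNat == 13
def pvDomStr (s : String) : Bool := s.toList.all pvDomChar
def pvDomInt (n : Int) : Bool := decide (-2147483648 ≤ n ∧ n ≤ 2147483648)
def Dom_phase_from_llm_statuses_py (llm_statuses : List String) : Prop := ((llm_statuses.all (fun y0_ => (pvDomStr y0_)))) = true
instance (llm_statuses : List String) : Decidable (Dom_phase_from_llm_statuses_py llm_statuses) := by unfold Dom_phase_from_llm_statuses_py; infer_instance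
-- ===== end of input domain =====

-- B replaces A's forward pass with three last-seen index trackers by a single
-- backwards scan with three booleans that early-exits at the last reviewing event
-- (alternative decomposition, same asymptotic cost; equal return value proved below).

-- ===== PORT A =====
-- one iteration of A's for-loop body: state = (last_review_idx, last_started_after_review_idx, last_finished_after_started_after_review_idx)
def pvStepA (idx : Int) (status : String) (st : Option Int × Option Int × Option Int) :
    Option Int × Option Int × Option Int :=
  let lowered := PySem.Str.lower status
  if PySem.Str.isIn "reviewing" lowered then (some idx, none, none)
  else if PySem.Str.isIn "started work" lowered && st.1.isSome then (st.1, some idx, none)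
  else if PySem.Str.isIn "finished work" lowered && st.2.1.isSome then (st.1, st.2.1, some idx)
  else st

-- 'for idx, status in enumerate(llm_statuses):'
def pvLoopA : List String → Int → (Option Int × Option Int × Option Int) →
    Option Int × Option Int × Option Int
  | [], _, st => st
  | x :: rest, i, st => pvLoopA rest (i + 1) (pvStepA i x st)

def phase_from_llm_statuses_py (llm_statuses : List String) : Option String :=
  if llm_statuses.isEmpty then none
  else
    let st := pvLoopA llm_statuses 0 (none, none, none)
    if st.1 = none then none
    else if st.2.2 ≠ none then some "phase3"
    else some "phase2"

-- ===== PORT B =====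
-- 'for status in reversed(llm_statuses):' with flags (seen_finished, seen_started, phase3_ready)
def pvLoopB : List String → Bool → Bool → Bool → Option String
  | [], _, _, _ => none
  | status :: rest, seenFin, seenStart, p3 =>
    let lowered := PySem.Str.lower status
    if PySem.Str.isIn "reviewing" lowered then
      if p3 then some "phase3" else some "phase2"
    else if PySem.Str.isIn "started work" lowered then
      if !seenStart then pvLoopB rest seenFin true seenFin
      else pvLoopB rest seenFin seenStart p3
    else if PySem.Str.isIn "finished work" lowered then pvLoopB rest true seenStart p3
    else pvLoopB rest seenFin seenStart p3

def phase_from_llm_statuses_py_alt (llm_statuses : List String) : Option String :=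
  pvLoopB llm_statuses.reverse false false false

-- ===== PRECONDITION & SPEC =====
def Spec_phase_from_llm_statuses_py (llm_statuses : List String) (out : Option String) : Prop := out = phase_from_llm_statuses_py_alt llm_statuses
instance (llm_statuses : List String) (out : Option String) : Decidable (Spec_phase_from_llm_statuses_py llm_statuses out) := by unfold Spec_phase_from_llm_statuses_py; infer_instance

-- ===== CLAIM (what is proved, stated in full; the proofs are below) =====
def Claim_equal_phase_from_llm_statuses_py : Prop := ∀ (llm_statuses : List String), Dom_phase_from_llm_statuses_py llm_statuses → Spec_phase_from_llm_statuses_py llm_statuses (phase_from_llm_statuses_py llm_statuses)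

-- ===== LEMMAS AND PROOFS =====

-- reachable states of A's loop: no started index without a review index, no finished index without a started index
def pvInv (st : Option Int × Option Int × Option Int) : Prop :=
  (st.1 = none → st.2.1 = none) ∧ (st.2.1 = none → st.2.2 = none)

-- the value B's scan produces, read off from A's loop state and B's incoming flags
def pvRhs (st : Option Int × Option Int × Option Int) (sf ss p3 : Bool) : Option String :=
  match st.1 with
  | none => none
  | some _ =>
    let p3' : Bool :=
      if ss then p3
      else match st.2.1 with
        | some _ => sf || st.2.2.isSome
        | none => p3
    some (if p3' then "phase3" else "phase2")

theorem pvInv_step (i : Int) (x : String) (st : Option Int × Option Int × Option Int)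
    (h : pvInv st) : pvInv (pvStepA i x st) := by
  obtain ⟨r, s, f⟩ := st
  obtain ⟨h1, h2⟩ := h
  simp only [pvStepA]
  split_ifs with hb1 hb2 hb3
  · exact ⟨fun _ => rfl, fun _ => rfl⟩
  · rw [Bool.and_eq_true, Option.isSome_iff_ne_none] at hb2
    exact ⟨fun hr => absurd hr hb2.2, fun _ => rfl⟩
  · rw [Bool.and_eq_true, Option.isSome_iff_ne_none] at hb3
    exact ⟨fun hr => absurd (h1 hr) hb3.2, fun hs => absurd hs hb3.2⟩
  · exact ⟨h1, h2⟩

theorem pvInv_loop (xs : List String) (i : Int) (st : Option Int × Option Int × Option Int)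
    (h : pvInv st) : pvInv (pvLoopA xs i st) := by
  induction xs generalizing i st with
  | nil => exact h
  | cons x rest ih => exact ih _ _ (pvInv_step i x st h)

theorem pvLoopA_append (xs ys : List String) (i : Int) (st : Option Int × Option Int × Option Int) :
    pvLoopA (xs ++ ys) i st = pvLoopA ys (i + xs.length) (pvLoopA xs i st) := by
  induction xs generalizing i st with
  | nil => simp [pvLoopA]
  | cons x rest ih =>
    have h : (i + 1) + (rest.length : Int) = i + ((rest.length + 1 : Nat) : Int) := by
      push_cast; ring
    simp only [List.cons_append, pvLoopA, ih, List.length_cons, h]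

theorem pvRhs_step (n : Int) (x : String) (st : Option Int × Option Int × Option Int)
    (sf ss p3 : Bool) (h : pvInv st) :
    pvRhs (pvStepA n x st) sf ss p3 =
      (let lowered := PySem.Str.lower x
       if PySem.Str.isIn "reviewing" lowered then
         if p3 then some "phase3" else some "phase2"
       else if PySem.Str.isIn "started work" lowered then
         if !ss then pvRhs st sf true sf
         else pvRhs st sf ss p3
       else if PySem.Str.isIn "finished work" lowered then pvRhs st true ss p3
       else pvRhs st sf ss p3) := by
  obtain ⟨r, s, f⟩ := st
  obtain ⟨h1, h2⟩ := h
  simp only [pvStepA]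
  by_cases hb1 : PySem.Chars.isIn ['r','e','v','i','e','w','i','n','g'] (PySem.Chars.lower x.toList) = true
  · cases p3 <;> simp [pvRhs, hb1]
  · by_cases hb2 : PySem.Chars.isIn ['s','t','a','r','t','e','d',' ','w','o','r','k'] (PySem.Chars.lower x.toList) = true
    · cases r with
      | none =>
        have hs := h1 rfl; subst hs
        have hf := h2 rfl; subst hf
        cases ss <;> simp [pvRhs, hb1, hb2]
      | some rv => cases ss <;> simp [pvRhs, hb1, hb2]
    · by_cases hb3 : PySem.Chars.isIn ['f','i','n','i','s','h','e','d',' ','w','o','r','k'] (PySem.Chars.lower x.toList) = true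
      · cases s with
        | none =>
          have hf := h2 rfl; subst hf
          cases r <;> cases ss <;> simp [pvRhs, hb1, hb2, hb3]
        | some sv =>
          cases r with
          | none => exact absurd (h1 rfl) (by simp)
          | some rv => cases ss <;> simp [pvRhs, hb1, hb2, hb3]
      · simp [pvRhs, hb1, hb2, hb3]

theorem pvLoopB_eq_pvRhs (xs : List String) (sf ss p3 : Bool) :
    pvLoopB xs.reverse sf ss p3 = pvRhs (pvLoopA xs 0 (none, none, none)) sf ss p3 := by
  induction xs using List.reverseRecOn generalizing sf ss p3 with
  | nil => simp [pvLoopB, pvLoopA, pvRhs]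
  | append_singleton ys x ih =>
    have hinv : pvInv (pvLoopA ys 0 (none, none, none)) :=
      pvInv_loop ys 0 _ (by simp [pvInv])
    rw [List.reverse_append]
    simp only [List.reverse_singleton, List.singleton_append, pvLoopB]
    rw [pvLoopA_append]
    simp only [pvLoopA]
    rw [pvRhs_step _ _ _ _ _ _ hinv]
    simp only []
    split_ifs <;> simp [ih]

-- ===== VERDICT (by name: the statement is the Claim_ definition above) =====
theorem phase_from_llm_statuses_py_spec : Claim_equal_phase_from_llm_statuses_py := by
  intro xs _
  unfold Spec_phase_from_llm_statuses_py phase_from_llm_statuses_py phase_from_llm_statuses_py_alt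
  rw [pvLoopB_eq_pvRhs]
  have hinv : pvInv (pvLoopA xs 0 (none, none, none)) :=
    pvInv_loop xs 0 _ (by simp [pvInv])
  cases xs with
  | nil => simp [pvRhs, pvLoopA]
  | cons y ys =>
    rcases hst : pvLoopA (y :: ys) 0 (none, none, none) with ⟨r, s, f⟩
    obtain ⟨h1, h2⟩ := hinv
    cases r <;> cases s <;> cases f <;> simp_all [pvRhs]
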